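-- pv_equiv track=rewrite | github.com/LucMiaz/pyCSRML | scripts/create_size_benchmarks.py | assign_bins
-- ===== SOURCE A (Python) =====
-- BINS = [
--     ("bench_tiny",   1,  10),
--     ("bench_small",  11, 20),
--     ("bench_medium", 21, 35),
--     ("bench_large",  36, 60),
--     ("bench_xlarge", 61, None),
-- ]
--
-- def assign_bins(rows: list[dict], max_per_set: int) -> dict[str, list[dict]]:
--     """Partition rows into size bins, each capped at *max_per_set*."""
--     sets: dict[str, list[dict]] = {name: [] for name, _, _ in BINS}
--     for row in rows:
--         ha = row["heavy_atoms"]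
--         for name, lo, hi in BINS:
--             if ha >= lo and (hi is None or ha <= hi):
--                 if len(sets[name]) < max_per_set:
--                     sets[name].append(row)
--                 break
--     return sets
-- ===== SOURCE B (Python) =====
-- _UPPERS = (10, 20, 35, 60)
-- _NAMES = ("bench_tiny", "bench_small", "bench_medium", "bench_large", "bench_xlarge")
--
--
-- def assign_bins(rows: list[dict], max_per_set: int) -> dict[str, list[dict]]:
--     """Partition rows into size bins, each capped at *max_per_set*."""
--     full = {name: [] for name in _NAMES}
--     for row in rows:
--         ha = row["heavy_atoms"]
--         if ha >= 1:
--             full[_NAMES[sum(u < ha for u in _UPPERS)]].append(row)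
--     cap = max(max_per_set, 0)
--     return {name: lst[:cap] for name, lst in full.items()}
-- ===== Notes on version B (the rewrite author's own statement) =====
-- stated objective: alternative
-- what changed: Replaces the inner (lo,hi)-range scan with break and the inline per-bin cap by a branch-free threshold count (sum of uppers below ha) selecting the bin in one pass into uncapped lists, with the cap applied afterwards by slicing each bin to max(max_per_set,0).
import Mathlib
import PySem

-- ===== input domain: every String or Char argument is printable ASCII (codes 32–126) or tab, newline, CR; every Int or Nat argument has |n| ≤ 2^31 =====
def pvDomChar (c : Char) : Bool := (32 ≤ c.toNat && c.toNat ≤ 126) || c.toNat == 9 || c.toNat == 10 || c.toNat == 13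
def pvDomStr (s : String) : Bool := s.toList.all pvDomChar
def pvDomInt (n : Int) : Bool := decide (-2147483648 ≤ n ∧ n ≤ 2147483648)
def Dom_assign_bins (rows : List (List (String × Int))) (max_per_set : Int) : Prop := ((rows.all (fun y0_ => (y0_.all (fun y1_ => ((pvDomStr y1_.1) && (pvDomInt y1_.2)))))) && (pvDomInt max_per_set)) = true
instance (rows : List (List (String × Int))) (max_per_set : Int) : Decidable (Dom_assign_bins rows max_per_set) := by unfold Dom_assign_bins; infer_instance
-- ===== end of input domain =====

-- B picks each row's bin by a threshold count into uncapped lists and applies the cap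
-- afterwards by slicing, instead of A's (lo,hi)-range scan with break and inline cap.


-- ===== PORT A =====
-- BINS
def pvBins : List (String × Int × Option Int) :=
  [("bench_tiny", 1, some 10), ("bench_small", 11, some 20), ("bench_medium", 21, some 35),
   ("bench_large", 36, some 60), ("bench_xlarge", 61, none)]

-- A's inner 'for name, lo, hi in BINS: … break' loop, acting on the current sets dict
def pvLoopA (m : Int) (row : List (String × Int)) (ha : Int) :
    List (String × Int × Option Int) → PySem.Dict String (List (List (String × Int))) →
    PySem.Dict String (List (List (String × Int)))
  | [], sets => sets
  | (name, lo, hi) :: rest, sets =>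
    if decide (lo ≤ ha) && (hi.elim true (fun h => decide (ha ≤ h))) then
      (if ((sets.getD name []).length : Int) < m then sets.modify name [] (fun l => l ++ [row]) else sets)
    else pvLoopA m row ha rest sets

def assign_bins (rows : List (List (String × Int))) (max_per_set : Int) : List (String × List (List (String × Int))) :=
  let sets0 := pvBins.foldl (fun d b => d.insert b.1 ([] : List (List (String × Int)))) PySem.Dict.empty
  let sets := rows.foldl (fun sets row =>
    match (PySem.Dict.mk row).get? "heavy_atoms" with
    | none => sets          -- Python raises KeyError here; excluded by Pre_assign_bins
    | some ha => pvLoopA max_per_set row ha pvBins sets) sets0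
  sets.items

-- ===== PORT B =====
def pvUppers : List Int := [10, 20, 35, 60]
def pvNames : List String := ["bench_tiny", "bench_small", "bench_medium", "bench_large", "bench_xlarge"]

def assign_bins_alt (rows : List (List (String × Int))) (max_per_set : Int) : List (String × List (List (String × Int))) :=
  let full0 := pvNames.foldl (fun d n => d.insert n ([] : List (List (String × Int)))) PySem.Dict.empty
  let full := rows.foldl (fun d row =>
    match (PySem.Dict.mk row).get? "heavy_atoms" with
    | none => d             -- Python raises KeyError here; excluded by Pre_assign_bins
    | some ha =>
      if 1 ≤ ha then
        -- _NAMES[sum(u < ha for u in _UPPERS)]; the index is always in range (0..4)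
        d.modify (PySem.List.pyGetD pvNames
            (pvUppers.foldl (fun acc u => if u < ha then acc + 1 else acc) (0 : Int)) "")
          [] (fun l => l ++ [row])
      else d) full0
  let cap := max max_per_set 0
  full.items.map (fun p => (p.1, PySem.List.slice p.2 none (some cap)))

-- ===== PRECONDITION & SPEC =====
-- Pre_ excludes exactly the inputs where some row lacks the key "heavy_atoms", on which A raises KeyError.
def Pre_assign_bins (rows : List (List (String × Int))) (max_per_set : Int) : Prop :=
  ∀ row ∈ rows, ((PySem.Dict.mk row).get? "heavy_atoms").isSome
instance (rows : List (List (String × Int))) (max_per_set : Int) : Decidable (Pre_assign_bins rows max_per_set) := by unfold Pre_assign_bins; infer_instance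

def pvWitness_assign_bins : (List (List (String × Int))) × Int := ([[("heavy_atoms", 7)], [("heavy_atoms", 25), ("x", 1)]], 2)

def Spec_assign_bins (rows : List (List (String × Int))) (max_per_set : Int) (out : List (String × List (List (String × Int)))) : Prop := out = assign_bins_alt rows max_per_set
instance (rows : List (List (String × Int))) (max_per_set : Int) (out : List (String × List (List (String × Int)))) : Decidable (Spec_assign_bins rows max_per_set out) := by unfold Spec_assign_bins; infer_instance

-- ===== CLAIM (what is proved, stated in full; the proofs are below) =====
def Claim_equal_assign_bins : Prop := ∀ (rows : List (List (String × Int))) (max_per_set : Int), Dom_assign_bins rows max_per_set → Pre_assign_bins rows max_per_set → Spec_assign_bins rows max_per_set (assign_bins rows max_per_set)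

-- ===== LEMMAS AND PROOFS =====

-- the bin name a heavy-atom count ≥ 1 falls in
def pvBinName (ha : Int) : String :=
  if ha ≤ 10 then "bench_tiny" else if ha ≤ 20 then "bench_small"
  else if ha ≤ 35 then "bench_medium" else if ha ≤ 60 then "bench_large" else "bench_xlarge"

-- A's inner loop: skip if ha < 1, else cap-append at pvBinName ha
lemma loopA_eq (m : Int) (row : List (String × Int)) (ha : Int) (sets : PySem.Dict String (List (List (String × Int)))) :
    pvLoopA m row ha pvBins sets =
    if ha < 1 then sets else
      (if ((sets.getD (pvBinName ha) []).length : Int) < m then sets.modify (pvBinName ha) [] (fun l => l ++ [row]) else sets) := by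
  simp only [pvBins, pvLoopA, Option.elim]
  rcases lt_or_ge ha 1 with h0 | h0
  · simp [h0, show ¬(1:Int) ≤ ha by omega, show ¬(11:Int) ≤ ha by omega,
      show ¬(21:Int) ≤ ha by omega, show ¬(36:Int) ≤ ha by omega, show ¬(61:Int) ≤ ha by omega]
  · have hn : ¬ ha < 1 := by omega
    by_cases hA : ha ≤ 10
    · simp [pvBinName, hn, hA, show (1:Int) ≤ ha by omega]
    · by_cases hB : ha ≤ 20
      · simp [pvBinName, hn, hA, hB, show (1:Int) ≤ ha by omega, show (11:Int) ≤ ha by omega]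
      · by_cases hC : ha ≤ 35
        · simp [pvBinName, hn, hA, hB, hC, show (1:Int) ≤ ha by omega, show (21:Int) ≤ ha by omega]
        · by_cases hD : ha ≤ 60
          · simp [pvBinName, hn, hA, hB, hC, hD, show (1:Int) ≤ ha by omega, show (36:Int) ≤ ha by omega]
          · simp [pvBinName, hn, hA, hB, hC, hD, show (1:Int) ≤ ha by omega, show (61:Int) ≤ ha by omega]

-- B's bin choice (threshold count into pvNames) agrees with pvBinName for ha ≥ 1
lemma stepB_name (ha : Int) (h : 1 ≤ ha) :
    PySem.List.pyGetD pvNames (pvUppers.foldl (fun acc u => if u < ha then acc + 1 else acc) (0 : Int)) "" = pvBinName ha := by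
  simp only [pvUppers, List.foldl, pvBinName]
  by_cases hA : ha ≤ 10
  · simp [hA, show ¬(10:Int) < ha by omega, show ¬(20:Int) < ha by omega, show ¬(35:Int) < ha by omega,
      show ¬(60:Int) < ha by omega, pvNames, PySem.List.pyGetD]
  · by_cases hB : ha ≤ 20
    · simp [hA, hB, show (10:Int) < ha by omega, show ¬(20:Int) < ha by omega, show ¬(35:Int) < ha by omega,
        show ¬(60:Int) < ha by omega, pvNames, PySem.List.pyGetD]
    · by_cases hC : ha ≤ 35
      · simp [hA, hB, hC, show (10:Int) < ha by omega, show (20:Int) < ha by omega, show ¬(35:Int) < ha by omega,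
          show ¬(60:Int) < ha by omega, pvNames, PySem.List.pyGetD]
      · by_cases hD : ha ≤ 60
        · simp [hA, hB, hC, hD, show (10:Int) < ha by omega, show (20:Int) < ha by omega, show (35:Int) < ha by omega,
            show ¬(60:Int) < ha by omega, pvNames, PySem.List.pyGetD]
        · simp [hA, hB, hC, hD, show (10:Int) < ha by omega, show (20:Int) < ha by omega, show (35:Int) < ha by omega,
            show (60:Int) < ha by omega, pvNames, PySem.List.pyGetD]

-- A's capped append on the truncated list equals truncating B's plain append
lemma take_cap_step (m : Int) (b : List (List (String × Int))) (r : List (String × Int)) :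
    (if ((b.take (max m 0).toNat).length : Int) < m then b.take (max m 0).toNat ++ [r]
     else b.take (max m 0).toNat)
    = (b ++ [r]).take (max m 0).toNat := by
  by_cases hlen : b.length < (max m 0).toNat
  · have h1 : b.take (max m 0).toNat = b := List.take_of_length_le (by omega)
    have h2 : (b ++ [r]).take (max m 0).toNat = b ++ [r] := by
      apply List.take_of_length_le; simp; omega
    rw [h1, h2, if_pos]
    omega
  · have h2 : (b ++ [r]).take (max m 0).toNat = b.take (max m 0).toNat :=
      List.take_append_of_le_length (by omega)
    rw [h2, if_neg]
    simp only [List.length_take]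
    omega

-- main invariant: at any key c, A's folded value is B's folded value truncated to the cap
lemma fold_pointwise (m : Int) (rows : List (List (String × Int))) (c : String)
    (dA dB : PySem.Dict String (List (List (String × Int))))
    (h : dA.getD c [] = (dB.getD c []).take (max m 0).toNat) :
    ((rows.foldl (fun sets row =>
        match (PySem.Dict.mk row).get? "heavy_atoms" with
        | none => sets
        | some ha => pvLoopA m row ha pvBins sets) dA).getD c [])
    = ((rows.foldl (fun d row =>
        match (PySem.Dict.mk row).get? "heavy_atoms" with
        | none => d
        | some ha =>
          if 1 ≤ ha then
            d.modify (PySem.List.pyGetD pvNames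
                (pvUppers.foldl (fun acc u => if u < ha then acc + 1 else acc) (0 : Int)) "")
              [] (fun l => l ++ [row])
          else d) dB).getD c []).take (max m 0).toNat := by
  induction rows generalizing dA dB with
  | nil => exact h
  | cons row rest ih =>
    rw [List.foldl_cons, List.foldl_cons]
    apply ih
    cases hget : (PySem.Dict.mk row).get? "heavy_atoms" with
    | none => exact h
    | some ha =>
      simp only [loopA_eq]
      by_cases h1 : 1 ≤ ha
      · rw [if_neg (by omega), if_pos h1, stepB_name ha h1]
        by_cases hc : c = pvBinName ha
        · rw [← hc, apply_ite (fun d => PySem.Dict.getD d c []), PySem.Dict.getD_modify_self,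
            PySem.Dict.getD_modify_self, h]
          exact take_cap_step m (dB.getD c []) row
        · rw [apply_ite (fun d => PySem.Dict.getD d c []), PySem.Dict.getD_modify_of_ne _ _ _ hc,
            PySem.Dict.getD_modify_of_ne _ _ _ hc, ite_self]
          exact h
      · rw [if_pos (by omega), if_neg h1]
        exact h

-- the evolving dicts always keep exactly the five bin keys
def pvInit : PySem.Dict String (List (List (String × Int))) :=
  ⟨[("bench_tiny", []), ("bench_small", []), ("bench_medium", []), ("bench_large", []), ("bench_xlarge", [])]⟩

lemma pvBinName_mem (ha : Int) : pvBinName ha ∈ pvNames := by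
  unfold pvBinName pvNames; split_ifs <;> simp

lemma keys_foldA (m : Int) (rows : List (List (String × Int))) (dA : PySem.Dict String (List (List (String × Int))))
    (hk : dA.keys = pvNames) :
    (rows.foldl (fun sets row =>
        match (PySem.Dict.mk row).get? "heavy_atoms" with
        | none => sets
        | some ha => pvLoopA m row ha pvBins sets) dA).keys = pvNames := by
  induction rows generalizing dA with
  | nil => exact hk
  | cons row rest ih =>
    rw [List.foldl_cons]
    apply ih
    cases hget : (PySem.Dict.mk row).get? "heavy_atoms" with
    | none => simpa only [hget] using hk
    | some ha =>
      have hcont : dA.contains (pvBinName ha) = true :=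
        (PySem.Dict.contains_iff_mem_keys _ _).mpr (hk ▸ pvBinName_mem ha)
      simp only [loopA_eq]
      split_ifs <;>
        simp [PySem.Dict.keys_modify, PySem.Dict.keys_insert_of_contains _ _ hcont, hk]

lemma keys_foldB (rows : List (List (String × Int))) (dB : PySem.Dict String (List (List (String × Int))))
    (hk : dB.keys = pvNames) :
    (rows.foldl (fun d row =>
        match (PySem.Dict.mk row).get? "heavy_atoms" with
        | none => d
        | some ha =>
          if 1 ≤ ha then
            d.modify (PySem.List.pyGetD pvNames
                (pvUppers.foldl (fun acc u => if u < ha then acc + 1 else acc) (0 : Int)) "")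
              [] (fun l => l ++ [row])
          else d) dB).keys = pvNames := by
  induction rows generalizing dB with
  | nil => exact hk
  | cons row rest ih =>
    rw [List.foldl_cons]
    apply ih
    cases hget : (PySem.Dict.mk row).get? "heavy_atoms" with
    | none => simpa only [hget] using hk
    | some ha =>
      by_cases h1 : 1 ≤ ha
      · have hcont : dB.contains (PySem.List.pyGetD pvNames
            (pvUppers.foldl (fun acc u => if u < ha then acc + 1 else acc) (0 : Int)) "") = true := by
          rw [stepB_name ha h1]
          exact (PySem.Dict.contains_iff_mem_keys _ _).mpr (hk ▸ pvBinName_mem ha)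
        simp [h1, PySem.Dict.keys_modify, PySem.Dict.keys_insert_of_contains _ _ hcont, hk]
      · simp [h1, hk]

-- every value of a literal dict with [] values is [] under getD
lemma getD_nil_values (l : List (String × List (List (String × Int)))) (c : String)
    (hv : ∀ p ∈ l, p.2 = ([] : List (List (String × Int)))) :
    (PySem.Dict.mk l).getD c [] = [] := by
  induction l with
  | nil => rfl
  | cons p rest ih =>
    rw [PySem.Dict.getD_eq_get?_getD, PySem.Dict.get?_mk_cons]
    split_ifs with h
    · simp [hv p (by simp)]
    · rw [← PySem.Dict.getD_eq_get?_getD]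
      exact ih (fun q hq => hv q (by simp [hq]))

-- ===== VERDICT (by name: the statement is the Claim_ definition above) =====
theorem assign_bins_spec : Claim_equal_assign_bins := by
  intro rows m _hdom _hpre
  unfold Spec_assign_bins assign_bins assign_bins_alt
  have hA0 : pvBins.foldl (fun d b => d.insert b.1 ([] : List (List (String × Int)))) PySem.Dict.empty = pvInit := by rfl
  have hB0 : pvNames.foldl (fun d n => d.insert n ([] : List (List (String × Int)))) PySem.Dict.empty = pvInit := by rfl
  have hkI : pvInit.keys = pvNames := by rfl
  simp only [hA0, hB0]
  have hkA := keys_foldA m rows pvInit hkI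
  have hkB := keys_foldB rows pvInit hkI
  have hndA : (rows.foldl (fun sets row =>
      match (PySem.Dict.mk row).get? "heavy_atoms" with
      | none => sets
      | some ha => pvLoopA m row ha pvBins sets) pvInit).keys.Nodup := by
    rw [hkA]; decide
  have hndB : (rows.foldl (fun d row =>
      match (PySem.Dict.mk row).get? "heavy_atoms" with
      | none => d
      | some ha =>
        if 1 ≤ ha then
          d.modify (PySem.List.pyGetD pvNames
              (pvUppers.foldl (fun acc u => if u < ha then acc + 1 else acc) (0 : Int)) "")
            [] (fun l => l ++ [row])
        else d) pvInit).keys.Nodup := by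
    rw [hkB]; decide
  rw [PySem.Dict.items_eq_map_keys _ hndA ([] : List (List (String × Int))),
    PySem.Dict.items_eq_map_keys _ hndB ([] : List (List (String × Int))), hkA, hkB, List.map_map]
  apply List.map_congr_left
  intro k _hkmem
  have hinit : pvInit.getD k [] = (pvInit.getD k []).take (max m 0).toNat := by
    rw [getD_nil_values _ k (by intro p hp; fin_cases hp <;> rfl), List.take_nil]
  have hpt := fold_pointwise m rows k pvInit pvInit hinit
  simp only [Function.comp]
  rw [hpt, PySem.List.slice_to _ (by omega : (0:Int) ≤ max m 0)]
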